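-- pv_equiv track=rewrite | github.com/AdityaMalu/CompetetivePrograming | Codechef/Starters_142/Sum_of_Xors.py | calculate_min_ugliness_sum
-- ===== SOURCE A (Python) =====
-- def calculate_min_ugliness_sum(N, M):
--     total_cells = N * M
--     min_ugliness_sum = 0
--
--     for K in range(1, total_cells + 1):
--         # For K <= N or K <= M, it is straightforward.
--         if K <= min(N, M):
--             min_ugliness_sum += 2
--         else:
--             # For larger K, we distribute ones more evenly
--             if K % 2 == 0:
--                 min_ugliness_sum += 2
--             else:
--                 min_ugliness_sum += 3
--
--     return min_ugliness_sum
-- ===== SOURCE B (Python) =====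
-- def calculate_min_ugliness_sum(N, M):
--     T = N * M
--     if T <= 0:
--         return 0
--     m = min(N, M)
--     L = min(max(m, 0), T)
--     # every K in [1, T] contributes 2; odd K with K > m contribute 1 extra
--     return 2 * T + (T + 1) // 2 - (L + 1) // 2
-- ===== Notes on version B (the rewrite author's own statement) =====
-- stated objective: faster
-- what changed: Replaced the O(N*M) loop over all K with an O(1) closed form: 2*N*M plus the count of odd K in (min(N,M), N*M], computed with two floor divisions.
import Mathlib
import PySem

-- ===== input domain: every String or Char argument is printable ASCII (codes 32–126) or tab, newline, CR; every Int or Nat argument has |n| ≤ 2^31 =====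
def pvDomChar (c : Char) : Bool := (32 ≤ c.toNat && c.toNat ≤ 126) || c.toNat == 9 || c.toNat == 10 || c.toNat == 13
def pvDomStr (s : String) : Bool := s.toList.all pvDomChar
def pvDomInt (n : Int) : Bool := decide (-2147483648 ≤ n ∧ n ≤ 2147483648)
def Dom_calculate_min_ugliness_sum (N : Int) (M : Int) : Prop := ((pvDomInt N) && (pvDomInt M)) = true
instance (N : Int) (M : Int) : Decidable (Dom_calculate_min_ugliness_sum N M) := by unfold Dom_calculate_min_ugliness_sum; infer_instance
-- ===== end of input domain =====

-- B replaces A's O(N*M) loop by an O(1) closed form (2*N*M plus the count of odd K in (min(N,M), N*M]).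

-- ===== PORT A =====
def calculate_min_ugliness_sum (N : Int) (M : Int) : Int :=
  let total_cells := N * M
  (PySem.List.pyRange 1 (total_cells + 1) 1).foldl
    (fun acc K =>
      if K ≤ min N M then acc + 2
      else if PySem.Int.mod K 2 = 0 then acc + 2
      else acc + 3) 0

-- ===== PORT B =====
def calculate_min_ugliness_sum_alt (N : Int) (M : Int) : Int :=
  let T := N * M
  if T ≤ 0 then 0
  else
    let m := min N M
    let L := min (max m 0) T
    2 * T + PySem.Int.floordiv (T + 1) 2 - PySem.Int.floordiv (L + 1) 2

-- ===== PRECONDITION & SPEC =====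
def Spec_calculate_min_ugliness_sum (N : Int) (M : Int) (out : Int) : Prop := out = calculate_min_ugliness_sum_alt N M
instance (N : Int) (M : Int) (out : Int) : Decidable (Spec_calculate_min_ugliness_sum N M out) := by unfold Spec_calculate_min_ugliness_sum; infer_instance

-- ===== CLAIM (what is proved, stated in full; the proofs are below) =====
def Claim_equal_calculate_min_ugliness_sum : Prop := ∀ (N : Int) (M : Int), Dom_calculate_min_ugliness_sum N M → Spec_calculate_min_ugliness_sum N M (calculate_min_ugliness_sum N M)

-- ===== LEMMAS AND PROOFS =====

-- closed form for A's loop over K = 1..n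
theorem pv_loop_closed (m : Int) (n : Nat) :
    (PySem.List.pyRange 1 ((n : Int) + 1) 1).foldl
      (fun acc K =>
        if K ≤ m then acc + 2
        else if PySem.Int.mod K 2 = 0 then acc + 2
        else acc + 3) 0
    = 2 * (n : Int) + ((n : Int) + 1) / 2 - (min (max m 0) (n : Int) + 1) / 2 := by
  induction n with
  | zero =>
      rw [PySem.List.pyRange_one_eq_nil (by omega)]
      simp
  | succ k ih =>
      push_cast
      rw [PySem.List.pyRange_one_succ_right (by omega : (1:Int) ≤ (k : Int) + 1),
          List.foldl_append, ih]
      simp only [List.foldl_cons, List.foldl_nil,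
        PySem.Int.mod_eq_emod_of_pos (by norm_num : (0:Int) < 2)]
      split_ifs with h1 h2 <;> omega

theorem calculate_min_ugliness_sum_eq_alt (N M : Int) :
    calculate_min_ugliness_sum N M = calculate_min_ugliness_sum_alt N M := by
  simp only [calculate_min_ugliness_sum, calculate_min_ugliness_sum_alt]
  by_cases hT : N * M ≤ 0
  · rw [PySem.List.pyRange_one_eq_nil (by omega)]
    simp [hT]
  · have hpos : 0 < N * M := by omega
    have hcast : ((N * M).toNat : Int) = N * M := Int.toNat_of_nonneg (by omega)
    simp only [if_neg hT]
    rw [PySem.Int.floordiv_eq_ediv_of_pos (by norm_num),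
        PySem.Int.floordiv_eq_ediv_of_pos (by norm_num)]
    have := pv_loop_closed (min N M) (N * M).toNat
    rw [hcast] at this
    simpa using this

-- ===== VERDICT (by name: the statement is the Claim_ definition above) =====
theorem calculate_min_ugliness_sum_spec : Claim_equal_calculate_min_ugliness_sum := by
  intro N M _
  unfold Spec_calculate_min_ugliness_sum
  exact calculate_min_ugliness_sum_eq_alt N M
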